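-- pv_equiv track=rewrite | github.com/davidbrochart/anycorn | src/anycorn/utils.py | _escape_rfc4514_value
-- ===== SOURCE A (Python) =====
-- def _escape_rfc4514_value(value: str) -> str:
--     escaped = []
--     for index, char in enumerate(value):
--         if (
--             char in {",", "+", '"', "\\", "<", ">", ";"}
--             or (index == 0 and char in {"#", " "})
--             or (index == len(value) - 1 and char == " ")
--         ):
--             escaped.append("\\" + char)
--         else:
--             escaped.append(char)
--     return "".join(escaped)
-- ===== SOURCE B (Python) =====
-- _TABLE = {ord(c): "\\" + c for c in ',+"\\<>;'}
--
--
-- def _escape_rfc4514_value(value: str) -> str: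
--     result = value.translate(_TABLE)
--     if value[:1] in ("#", " "):
--         result = "\\" + result
--     if len(value) > 1 and value[-1] == " ":
--         result = result[:-1] + "\\ "
--     return result
-- ===== Notes on version B (the rewrite author's own statement) =====
-- stated objective: idiomatic
-- what changed: Replaced the index-checking per-character loop with a bulk str.translate over a precomputed escape table plus two constant-time boundary fix-ups (prepend backslash for a leading '#'/' ', rewrite a trailing space).
import Mathlib
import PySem

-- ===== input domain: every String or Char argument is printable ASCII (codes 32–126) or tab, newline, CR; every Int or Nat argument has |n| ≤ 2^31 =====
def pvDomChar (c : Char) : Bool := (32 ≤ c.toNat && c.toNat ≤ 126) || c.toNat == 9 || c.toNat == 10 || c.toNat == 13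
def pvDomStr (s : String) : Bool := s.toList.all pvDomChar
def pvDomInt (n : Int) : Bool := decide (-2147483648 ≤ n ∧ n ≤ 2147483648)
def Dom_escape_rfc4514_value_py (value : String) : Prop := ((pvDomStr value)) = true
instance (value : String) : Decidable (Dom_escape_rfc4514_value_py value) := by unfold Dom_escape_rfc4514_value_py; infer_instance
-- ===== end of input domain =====

-- ===== PORT A =====
-- B is an idiomatic table-driven rewrite of A (bulk translate + two boundary fix-ups); same behaviour, proved equal.
-- Strings are handled as their character lists (String.ofList at the end); join of one-piece strings = List.flatten, exact.
def pvSpecials : List Char := [',', '+', '"', '\\', '<', '>', ';']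

def escape_rfc4514_value_py (value : String) : String :=
  let cs := value.toList
  let escaped := (PySem.List.enumerate cs).foldl
    (fun (acc : List (List Char)) p =>
      if p.2 ∈ pvSpecials ∨ (p.1 = 0 ∧ (p.2 = '#' ∨ p.2 = ' ')) ∨ (p.1 = PySem.List.len cs - 1 ∧ p.2 = ' ')
      then acc ++ [['\\', p.2]] else acc ++ [[p.2]]) []
  String.ofList escaped.flatten

-- ===== PORT B =====
-- the translation table: each special char maps to "\\"+char, others map to themselves
def pvTable (c : Char) : List Char := if c ∈ pvSpecials then ['\\', c] else [c]

def escape_rfc4514_value_py_alt (value : String) : String :=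
  let cs := value.toList
  -- result = value.translate(_TABLE)
  let r0 := (cs.map pvTable).flatten
  -- if value[:1] in ("#", " "): result = "\\" + result
  let r1 := if cs.take 1 = ['#'] ∨ cs.take 1 = [' '] then '\\' :: r0 else r0
  -- if len(value) > 1 and value[-1] == " ": result = result[:-1] + "\\ "
  let r2 := if 1 < cs.length ∧ cs.getLast? = some ' ' then r1.dropLast ++ ['\\', ' '] else r1
  String.ofList r2

-- ===== PRECONDITION & SPEC =====
def Spec_escape_rfc4514_value_py (value : String) (out : String) : Prop := out = escape_rfc4514_value_py_alt value
instance (value : String) (out : String) : Decidable (Spec_escape_rfc4514_value_py value out) := by unfold Spec_escape_rfc4514_value_py; infer_instance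

-- ===== CLAIM (what is proved, stated in full; the proofs are below) =====
def Claim_equal_escape_rfc4514_value_py : Prop := ∀ (value : String), Dom_escape_rfc4514_value_py value → Spec_escape_rfc4514_value_py value (escape_rfc4514_value_py value)

-- ===== LEMMAS AND PROOFS =====

-- the per-character piece A appends, as a function of the total length n (as Int)
def pieceA (n : Int) (p : Int × Char) : List Char :=
  if p.2 ∈ pvSpecials ∨ (p.1 = 0 ∧ (p.2 = '#' ∨ p.2 = ' ')) ∨ (p.1 = n - 1 ∧ p.2 = ' ')
  then ['\\', p.2] else [p.2]

theorem foldA (n : Int) (l : List (Int × Char)) (acc : List (List Char)) :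
    l.foldl (fun acc p =>
      if p.2 ∈ pvSpecials ∨ (p.1 = 0 ∧ (p.2 = '#' ∨ p.2 = ' ')) ∨ (p.1 = n - 1 ∧ p.2 = ' ')
      then acc ++ [['\\', p.2]] else acc ++ [[p.2]]) acc = acc ++ l.map (pieceA n) := by
  induction l generalizing acc with
  | nil => simp
  | cons x xs ih => simp only [List.foldl_cons, List.map_cons, ih, pieceA]; split <;> simp

-- middle characters (index ≥ 1 and below n-1) are escaped exactly by the table
theorem midA (l : List Char) (k n : Int) (hk : 1 ≤ k) (hub : k + l.length ≤ n - 1) :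
    (PySem.List.enumerate l k).map (pieceA n) = l.map pvTable := by
  induction l generalizing k with
  | nil => simp [PySem.List.enumerate_nil]
  | cons c cs ih =>
      rw [PySem.List.enumerate_cons]
      have hk0 : ¬ (k = 0) := by omega
      have hkn : ¬ (k = n - 1) := by simp at hub; omega
      simp only [List.map_cons, pieceA, pvTable, hk0, hkn, false_and, or_false]
      rw [ih (k+1) (by omega) (by simp at hub ⊢; omega)]

theorem key2 (c0 : Char) (mid : List Char) (cl : Char) :
    ((PySem.List.enumerate (c0 :: (mid ++ [cl]))).map
        (pieceA (PySem.List.len (c0 :: (mid ++ [cl]))))).flatten =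
    (let cs := c0 :: (mid ++ [cl])
     let r0 := (cs.map pvTable).flatten
     let r1 := if cs.take 1 = ['#'] ∨ cs.take 1 = [' '] then '\\' :: r0 else r0
     if 1 < cs.length ∧ cs.getLast? = some ' ' then r1.dropLast ++ ['\\', ' '] else r1) := by
  have hlen : PySem.List.len (c0 :: (mid ++ [cl])) = (mid.length : Int) + 2 := by
    simp [PySem.List.len_eq]; omega
  have hlast : (c0 :: (mid ++ [cl])).getLast? = some cl := by
    rw [← List.cons_append]; exact List.getLast?_concat ..
  rw [hlen, PySem.List.enumerate_cons, PySem.List.enumerate_append, PySem.List.enumerate_cons,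
      PySem.List.enumerate_nil]
  have htake1 : List.take 1 (c0 :: (mid ++ [cl])) = [c0] := rfl
  simp only [List.map_cons, List.map_append, List.map_nil, List.flatten_cons, List.flatten_append,
    List.flatten_nil, List.append_nil, hlast, htake1, List.length_cons,
    List.length_append, List.length_nil, zero_add]
  rw [midA mid 1 ((mid.length : Int) + 2) (by omega) (by omega)]
  have h1 : pieceA ((mid.length : Int) + 2) (0, c0) =
      (if c0 = '#' ∨ c0 = ' ' then ['\\'] else []) ++ pvTable c0 := by
    by_cases hs : c0 ∈ pvSpecials
    · have hp : ¬ (c0 = '#' ∨ c0 = ' ') := by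
        rintro (rfl | rfl) <;> revert hs <;> decide
      simp [pieceA, pvTable, hs, hp]
    · by_cases hp : c0 = '#' ∨ c0 = ' ' <;>
        simp [pieceA, pvTable, hs, hp]; omega
  have h2 : pieceA ((mid.length : Int) + 2) (1 + (mid.length : Int), cl) =
      if cl = ' ' then ['\\', ' '] else pvTable cl := by
    have hin : (1 : Int) + (mid.length : Int) = (mid.length : Int) + 2 - 1 := by omega
    have hi0 : ¬ ((mid.length : Int) + 2 - 1 = 0) := by omega
    rw [hin]
    by_cases ht : cl = ' '
    · subst ht; simp [pieceA, hi0]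
    · by_cases hs : cl ∈ pvSpecials <;> simp [pieceA, pvTable, hi0, ht, hs]
  rw [h1, h2]
  have hlt : 1 < mid.length + 1 + 1 := by omega
  have hcond2 : (([c0] : List Char) = ['#'] ∨ ([c0] : List Char) = [' ']) ↔ (c0 = '#' ∨ c0 = ' ') := by simp
  have hspace : pvTable ' ' = [' '] := by decide
  simp only [hlt, true_and, hcond2, Option.some_inj]
  by_cases ht : cl = ' '
  · subst ht
    simp only [hspace]
    by_cases hp : c0 = '#' ∨ c0 = ' '
    · simp only [if_pos hp]
      rw [show ('\\' :: (pvTable c0 ++ ((mid.map pvTable).flatten ++ [' ']))) =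
          ('\\' :: (pvTable c0 ++ (mid.map pvTable).flatten)) ++ [' '] by simp,
        List.dropLast_concat]
      simp
    · simp only [if_neg hp]
      rw [show (pvTable c0 ++ ((mid.map pvTable).flatten ++ [' '])) =
          (pvTable c0 ++ (mid.map pvTable).flatten) ++ [' '] by simp,
        List.dropLast_concat]
      simp
  · simp only [if_neg ht]
    by_cases hp : c0 = '#' ∨ c0 = ' ' <;> simp [hp]

theorem key (cs : List Char) :
    ((PySem.List.enumerate cs).map (pieceA (PySem.List.len cs))).flatten =
    (let r0 := (cs.map pvTable).flatten
     let r1 := if cs.take 1 = ['#'] ∨ cs.take 1 = [' '] then '\\' :: r0 else r0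
     if 1 < cs.length ∧ cs.getLast? = some ' ' then r1.dropLast ++ ['\\', ' '] else r1) := by
  match cs with
  | [] => simp [PySem.List.enumerate_nil]
  | [c] =>
      by_cases hs : c ∈ pvSpecials
      · have hp : ¬ (c = '#' ∨ c = ' ') := by
          rintro (rfl | rfl) <;> revert hs <;> decide
        simp [PySem.List.enumerate_cons, PySem.List.enumerate_nil, pieceA, pvTable,
          PySem.List.len_eq, hs, hp]
      · by_cases hp : c = '#' ∨ c = ' '
        · simp [PySem.List.enumerate_cons, PySem.List.enumerate_nil, pieceA, pvTable,
            PySem.List.len_eq, hs, hp]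
        · push Not at hp
          simp [PySem.List.enumerate_cons, PySem.List.enumerate_nil, pieceA, pvTable,
            PySem.List.len_eq, hs, hp.1, hp.2]
  | c0 :: c1 :: rest =>
      have h : c1 :: rest = (c1 :: rest).dropLast ++ [(c1 :: rest).getLast (by simp)] :=
        (List.dropLast_append_getLast (by simp)).symm
      rw [show (c0 :: c1 :: rest) = c0 :: ((c1 :: rest).dropLast ++ [(c1 :: rest).getLast (by simp)]) from by rw [← h]]
      exact key2 ..

-- ===== VERDICT (by name: the statement is the Claim_ definition above) =====
theorem escape_rfc4514_value_py_spec : Claim_equal_escape_rfc4514_value_py := by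
  intro value _
  unfold Spec_escape_rfc4514_value_py escape_rfc4514_value_py escape_rfc4514_value_py_alt
  simp only [foldA, List.nil_append]
  exact congrArg String.ofList (key value.toList)
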